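-- pv_equiv track=rewrite | github.com/Schemb/Diamonds-Trading | Michelle_algo_round3.py | values_extract
-- ===== SOURCE A (Python) =====
-- def values_extract(orderdepth_dict: dict, buy : int =0):
--     #orderdepth of each product has two attributes, order_depth.buy_orders and order_depth.sell_orders
--     #eg. buy_orders={9: 5, 10: 4, 8: 2}
--     #eg. sell_orders={12: -3, 11: -2, 14: -9 }
--     #the role of this function is to, taken two parameters, one (ordinary) dictionary and buy=0 or 1; return total volume and best_value
--     #the buy=0) in parameters in put means if not declaring, default value is buy=0. If declared 1, then buy=1
--     #tot_vol is the total volume of all buy offers; and tot_vol of all sell offers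
--     #best_value: if buy==0 eg. this is buy_orders, best value is the HIGHEST BID OFFER/ BUY PRICE
--     #best_value: if sell==1 eg. this is sell_orders, best value is the LOWEST ASK OFFER/ ASK PRICE
--     tot_vol  = 0
--     best_val  = 0
--     if buy==1:
--         #this is .buy_order
--         buy_orders_sorted=sorted(orderdepth_dict.items(),reverse=False) #in_ascending_order
--         #the highest bid offer/ buy price is the last key of this dictionary buy_orders_sorted
--         for buy_price, vol in buy_orders_sorted:
--             tot_vol += vol
--             best_val = buy_price #when buy_price is iterated to the last key of buy_orders_sorted, that's also the value of best_val
--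
--     if buy==0:
--         #This is .sell_order
--         sell_orders_sorted=sorted(orderdepth_dict.items(),reverse=True) #in_descending_order
--         #the lowest ask offer/ sell price to us is the last key
--         for ask,vol in sell_orders_sorted:
--             vol*= -1 #make vol positive
--             tot_vol += vol
--             best_val = ask #when ask is iterated to the last key which is the smallest ask offer/sell price to us, that's also the value of best_val
--
--     return tot_vol, best_val
-- ===== SOURCE B (Python) =====
-- def values_extract(orderdepth_dict: dict, buy: int = 0):
--     if buy == 1:
--         return sum(orderdepth_dict.values()), max(orderdepth_dict.keys(), default=0)
--     if buy == 0:
--         return -sum(orderdepth_dict.values()), min(orderdepth_dict.keys(), default=0)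
--     return 0, 0
-- ===== Notes on version B (the rewrite author's own statement) =====
-- stated objective: simpler
-- what changed: B drops A's sort-then-take-last-key loop entirely and computes the answer directly as sum() over the values plus max()/min() over the keys with default 0.
import Mathlib
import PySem

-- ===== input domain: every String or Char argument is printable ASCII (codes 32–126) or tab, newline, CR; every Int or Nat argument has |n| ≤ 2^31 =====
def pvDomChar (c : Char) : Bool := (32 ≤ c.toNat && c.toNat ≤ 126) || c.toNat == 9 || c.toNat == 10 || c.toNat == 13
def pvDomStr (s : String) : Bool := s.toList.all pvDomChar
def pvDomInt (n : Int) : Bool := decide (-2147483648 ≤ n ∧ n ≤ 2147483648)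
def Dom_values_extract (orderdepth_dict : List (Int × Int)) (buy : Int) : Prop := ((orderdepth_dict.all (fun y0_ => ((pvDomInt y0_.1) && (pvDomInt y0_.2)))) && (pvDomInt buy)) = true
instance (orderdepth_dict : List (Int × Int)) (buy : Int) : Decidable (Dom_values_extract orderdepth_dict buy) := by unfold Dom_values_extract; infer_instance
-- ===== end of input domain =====

-- B replaces A's sort-then-take-last loops with sum() over the values plus max()/min() over the keys (no sort); objective: simpler.

-- ===== PORT A =====
def values_extract (orderdepth_dict : List (Int × Int)) (buy : Int) : Int × Int :=
  -- state st = (tot_vol, best_val), initially (0, 0)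
  let st : Int × Int := (0, 0)
  let st :=
    if buy == 1 then
      let buy_orders_sorted := PySem.List.sorted2 orderdepth_dict (fun p => p.1) (fun p => p.2) false
      buy_orders_sorted.foldl (fun (s : Int × Int) p => (s.1 + p.2, p.1)) st
    else st
  let st :=
    if buy == 0 then
      let sell_orders_sorted := PySem.List.sorted2 orderdepth_dict (fun p => p.1) (fun p => p.2) true
      sell_orders_sorted.foldl (fun (s : Int × Int) p => (s.1 + (-1 * p.2), p.1)) st
    else st
  st

-- ===== PORT B =====
def values_extract_alt (orderdepth_dict : List (Int × Int)) (buy : Int) : Int × Int :=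
  if buy == 1 then
    ((orderdepth_dict.map (fun p => p.2)).sum,
     PySem.List.maxD (orderdepth_dict.map (fun p => p.1)) (fun k => k) 0)
  else if buy == 0 then
    (-(orderdepth_dict.map (fun p => p.2)).sum,
     PySem.List.minD (orderdepth_dict.map (fun p => p.1)) (fun k => k) 0)
  else (0, 0)

-- ===== PRECONDITION & SPEC =====
def Spec_values_extract (orderdepth_dict : List (Int × Int)) (buy : Int) (out : Int × Int) : Prop := out = values_extract_alt orderdepth_dict buy
instance (orderdepth_dict : List (Int × Int)) (buy : Int) (out : Int × Int) : Decidable (Spec_values_extract orderdepth_dict buy out) := by unfold Spec_values_extract; infer_instance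

-- ===== CLAIM (what is proved, stated in full; the proofs are below) =====
def Claim_equal_values_extract : Prop := ∀ (orderdepth_dict : List (Int × Int)) (buy : Int), Dom_values_extract orderdepth_dict buy → Spec_values_extract orderdepth_dict buy (values_extract orderdepth_dict buy)

-- ===== LEMMAS AND PROOFS =====

-- Python's default tuple comparison is lexicographic: sorted2 with the two projections
-- is sorted with the single lexicographic key toLex (p.1, p.2).
theorem sorted2_pair_eq_sorted_lex (d : List (Int × Int)) (rev : Bool) :
    PySem.List.sorted2 d (fun p => p.1) (fun p => p.2) rev
      = PySem.List.sorted d (fun p : Int × Int => (toLex (p.1, p.2) : Lex (Int × Int))) rev := by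
  have key : ∀ a b : Int × Int, (decide (a.1 < b.1) || (!decide (b.1 < a.1) && decide (a.2 < b.2)))
      = decide ((toLex (a.1, a.2) : Lex (Int × Int)) < toLex (b.1, b.2)) := by
    intro a b
    by_cases h1 : a.1 < b.1 <;> by_cases h2 : b.1 < a.1 <;> by_cases h3 : a.2 < b.2 <;>
      simp [h1, h2, h3, Prod.Lex.toLex_lt_toLex] <;> omega
  cases rev <;> simp only [PySem.List.sorted2, PySem.List.sorted, Bool.false_eq_true,
    if_false, reduceIte]
  · rw [show (fun (a b : Int × Int) => decide (a.1 < b.1) || (!decide (b.1 < a.1) && decide (a.2 < b.2)))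
        = fun (a b : Int × Int) => decide ((toLex (a.1, a.2) : Lex (Int × Int)) < toLex (b.1, b.2)) from
      funext fun a => funext fun b => key a b]
  · rw [show (fun (a b : Int × Int) => decide (b.1 < a.1) || (!decide (a.1 < b.1) && decide (b.2 < a.2)))
        = fun (a b : Int × Int) => decide ((toLex (b.1, b.2) : Lex (Int × Int)) < toLex (a.1, a.2)) from
      funext fun a => funext fun b => key b a]

theorem foldl_const_fst (l : List (Int × Int)) (c : Int) :
    l.foldl (fun (_ : Int) p => p.1) c = (l.map Prod.fst).getLastD c := by
  induction l generalizing c with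
  | nil => rfl
  | cons p t ih =>
    simp only [List.foldl_cons, List.map_cons, List.getLastD_cons]
    exact ih p.1

theorem le_getLastD_of_pairwise (ks : List Int) (c : Int)
    (h : ks.Pairwise (· ≤ ·)) : ∀ y ∈ ks, y ≤ ks.getLastD c := by
  induction ks generalizing c with
  | nil => intro y hy; simp at hy
  | cons a t ih =>
    intro y hy
    rw [List.getLastD_cons]
    rcases List.mem_cons.mp hy with rfl | hyt
    · rcases List.mem_cons.mp (List.getLastD_mem_cons (l := t) (a := y)) with h' | h'
      · omega
      · have := (List.pairwise_cons.mp h).1 _ h'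
        omega
    · exact ih a (List.pairwise_cons.mp h).2 y hyt

theorem getLastD_le_of_pairwise_rev (ks : List Int) (c : Int)
    (h : ks.Pairwise (fun a b => b ≤ a)) : ∀ y ∈ ks, ks.getLastD c ≤ y := by
  induction ks generalizing c with
  | nil => intro y hy; simp at hy
  | cons a t ih =>
    intro y hy
    rw [List.getLastD_cons]
    rcases List.mem_cons.mp hy with rfl | hyt
    · rcases List.mem_cons.mp (List.getLastD_mem_cons (l := t) (a := y)) with h' | h'
      · omega
      · have := (List.pairwise_cons.mp h).1 _ h'
        omega
    · exact ih a (List.pairwise_cons.mp h).2 y hyt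

-- the last key of an ascending list is max(keys, default=0) of any permutation of it
theorem getLastD_eq_maxD (ks kd : List Int) (hp : ks.Perm kd)
    (h : ks.Pairwise (· ≤ ·)) : ks.getLastD 0 = PySem.List.maxD kd (fun k => k) 0 := by
  cases kd with
  | nil => rw [List.perm_nil.mp hp]; rfl
  | cons x t =>
    have hks : ks ≠ [] := by
      intro h'; subst h'
      have := List.nil_perm.mp hp
      simp at this
    obtain ⟨a, ks', rfl⟩ := List.exists_cons_of_ne_nil hks
    have hmaxD : PySem.List.maxD (x :: t) (fun k => k) 0 = t.foldl max x := by
      simp [PySem.List.maxD, PySem.List.max?_id_cons]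
    rw [hmaxD]
    have hLmem : (a :: ks').getLastD 0 ∈ x :: t := by
      rw [List.getLastD_cons]
      exact hp.mem_iff.mp (List.getLastD_mem_cons (l := ks') (a := a))
    have hFmem : t.foldl max x ∈ a :: ks' := by
      rcases PySem.List.foldl_max_mem t x with h' | h'
      · exact hp.mem_iff.mpr (by rw [h']; exact List.mem_cons_self)
      · exact hp.mem_iff.mpr (List.mem_cons_of_mem x h')
    have h1 : (a :: ks').getLastD 0 ≤ t.foldl max x := by
      rcases List.mem_cons.mp hLmem with h' | h'
      · rw [h']; exact (PySem.List.le_foldl_max t x).1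
      · exact (PySem.List.le_foldl_max t x).2 _ h'
    have h2 : t.foldl max x ≤ (a :: ks').getLastD 0 :=
      le_getLastD_of_pairwise (a :: ks') 0 h _ hFmem
    omega

theorem getLastD_eq_minD (ks kd : List Int) (hp : ks.Perm kd)
    (h : ks.Pairwise (fun a b => b ≤ a)) : ks.getLastD 0 = PySem.List.minD kd (fun k => k) 0 := by
  cases kd with
  | nil => rw [List.perm_nil.mp hp]; rfl
  | cons x t =>
    have hks : ks ≠ [] := by
      intro h'; subst h'
      have := List.nil_perm.mp hp
      simp at this
    obtain ⟨a, ks', rfl⟩ := List.exists_cons_of_ne_nil hks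
    have hminD : PySem.List.minD (x :: t) (fun k => k) 0 = t.foldl min x := by
      simp [PySem.List.minD, PySem.List.min?_id_cons]
    rw [hminD]
    have hLmem : (a :: ks').getLastD 0 ∈ x :: t := by
      rw [List.getLastD_cons]
      exact hp.mem_iff.mp (List.getLastD_mem_cons (l := ks') (a := a))
    have hFmem : t.foldl min x ∈ a :: ks' := by
      rcases PySem.List.foldl_min_mem t x with h' | h'
      · exact hp.mem_iff.mpr (by rw [h']; exact List.mem_cons_self)
      · exact hp.mem_iff.mpr (List.mem_cons_of_mem x h')
    have h1 : t.foldl min x ≤ (a :: ks').getLastD 0 := by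
      rcases List.mem_cons.mp hLmem with h' | h'
      · rw [h']; exact (PySem.List.foldl_min_le t x).1
      · exact (PySem.List.foldl_min_le t x).2 _ h'
    have h2 : (a :: ks').getLastD 0 ≤ t.foldl min x :=
      getLastD_le_of_pairwise_rev (a :: ks') 0 h _ hFmem
    omega

theorem sum_map_neg_snd (l : List (Int × Int)) :
    (l.map (fun p => -1 * p.2)).sum = -(l.map (fun p => p.2)).sum := by
  induction l with
  | nil => rfl
  | cons p t ih =>
    simp only [List.map_cons, List.sum_cons, ih]
    ring

-- ===== VERDICT (by name: the statement is the Claim_ definition above) =====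
theorem values_extract_spec : Claim_equal_values_extract := by
  intro d buy _
  unfold Spec_values_extract values_extract values_extract_alt
  by_cases h1 : buy = 1
  · subst h1
    simp only [beq_self_eq_true, if_true, show ((1 : Int) == 0) = false from rfl,
      Bool.false_eq_true, if_false]
    rw [sorted2_pair_eq_sorted_lex]
    set s := PySem.List.sorted d (fun p : Int × Int => (toLex (p.1, p.2) : Lex (Int × Int))) false with hs
    have hperm : s.Perm d := PySem.List.sorted_perm d _ false
    rw [PySem.List.foldl_prod_mk (f := fun (a : Int) (p : Int × Int) => a + p.2)
        (g := fun (_ : Int) (p : Int × Int) => p.1)]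
    rw [PySem.List.foldl_add, foldl_const_fst]
    have hsum : (s.map (fun p => p.2)).sum = (d.map (fun p => p.2)).sum :=
      (hperm.map (fun p => p.2)).sum_eq
    have hpw : (s.map Prod.fst).Pairwise (· ≤ ·) := by
      refine List.Pairwise.map Prod.fst ?_ (PySem.List.sorted_pairwise d _)
      intro a b hab
      have := (Prod.Lex.toLex_le_toLex (x := (a.1, a.2)) (y := (b.1, b.2))).mp hab
      rcases this with h' | ⟨h', _⟩
      · exact le_of_lt h'
      · exact le_of_eq h'
    have hbest := getLastD_eq_maxD (s.map Prod.fst) (d.map Prod.fst) (hperm.map Prod.fst) hpw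
    rw [hbest, hsum]
    simp
  · by_cases h0 : buy = 0
    · subst h0
      simp only [show ((0 : Int) == 1) = false from rfl, Bool.false_eq_true, if_false,
        beq_self_eq_true, if_true]
      rw [sorted2_pair_eq_sorted_lex]
      set s := PySem.List.sorted d (fun p : Int × Int => (toLex (p.1, p.2) : Lex (Int × Int))) true with hs
      have hperm : s.Perm d := PySem.List.sorted_perm d _ true
      rw [PySem.List.foldl_prod_mk (f := fun (a : Int) (p : Int × Int) => a + -1 * p.2)
          (g := fun (_ : Int) (p : Int × Int) => p.1)]
      rw [PySem.List.foldl_add (g := fun p : Int × Int => -1 * p.2), foldl_const_fst]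
      have hsum : (s.map (fun p => -1 * p.2)).sum = -(d.map (fun p => p.2)).sum := by
        rw [(hperm.map (fun p => -1 * p.2)).sum_eq, sum_map_neg_snd]
      have hpw : (s.map Prod.fst).Pairwise (fun a b => b ≤ a) := by
        refine List.Pairwise.map Prod.fst ?_ (PySem.List.sorted_pairwise_rev d _)
        intro a b hab
        have := (Prod.Lex.toLex_le_toLex (x := (b.1, b.2)) (y := (a.1, a.2))).mp hab
        rcases this with h' | ⟨h', _⟩
        · exact le_of_lt h'
        · exact le_of_eq h'
      have hbest := getLastD_eq_minD (s.map Prod.fst) (d.map Prod.fst) (hperm.map Prod.fst) hpw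
      rw [hbest, hsum]
      simp
    · have hb1 : (buy == 1) = false := by simp [h1]
      have hb0 : (buy == 0) = false := by simp [h0]
      simp [hb1, hb0]
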